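-- pv_equiv track=rewrite | github.com/SR-MEiTY/i-SpeakR_GUI | i_SpeakR_gui.py | select_data_sets
-- ===== SOURCE A (Python) =====
-- def select_data_sets(info, data_type):
--     '''
--     Function to select development, enrollment and test sets when multiple
--     options are available.
--
--     Parameters
--     ----------
--     info : dict
--         Dict contains the information about various sets in the dataset.
--     data_type : str
--         'infer' or 'specify'.
--
--     Returns
--     -------
--     info : dict
--         A pruned dict that contains only those sets that are selected by the
--         user.
--
--     '''
--     if data_type=='specify':
--         end_str_ = '.csv'
--     else:
--         end_str_ = ''
--
--     # Select set names starting with "DEV"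
--     dev_sets = [set_name if (set_name.startswith('DEV') and set_name.endswith(end_str_)) else '' for set_name in info.keys()]
--     # Remove empty set names
--     dev_sets = list(filter(None, dev_sets))
--
--     # Select set names starting with "ENR"
--     enr_sets = [set_name if (set_name.startswith('ENR') and set_name.endswith(end_str_)) else '' for set_name in info.keys()]
--     # Remove empty set names
--     enr_sets = list(filter(None, enr_sets))
--
--     # Select set names starting with "TEST"
--     test_sets = [set_name if (set_name.startswith('TEST') and set_name.endswith(end_str_)) else '' for set_name in info.keys()]
--     # Remove empty set names
--     test_sets = list(filter(None, test_sets))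
--
--     return dev_sets, enr_sets, test_sets
-- ===== SOURCE B (Python) =====
-- def select_data_sets(info, data_type):
--     end_str_ = '.csv' if data_type == 'specify' else ''
--     dev_sets, enr_sets, test_sets = [], [], []
--     for set_name in info.keys():
--         if not set_name.endswith(end_str_):
--             continue
--         if set_name.startswith('DEV'):
--             dev_sets.append(set_name)
--         elif set_name.startswith('ENR'):
--             enr_sets.append(set_name)
--         elif set_name.startswith('TEST'):
--             test_sets.append(set_name)
--     return dev_sets, enr_sets, test_sets
-- ===== Notes on version B (the rewrite author's own statement) =====
-- stated objective: simpler
-- what changed: Replaces three separate map-to-empty-string-then-filter(None) scans over the keys with one loop that dispatches each key by prefix into the three lists.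
import Mathlib
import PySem

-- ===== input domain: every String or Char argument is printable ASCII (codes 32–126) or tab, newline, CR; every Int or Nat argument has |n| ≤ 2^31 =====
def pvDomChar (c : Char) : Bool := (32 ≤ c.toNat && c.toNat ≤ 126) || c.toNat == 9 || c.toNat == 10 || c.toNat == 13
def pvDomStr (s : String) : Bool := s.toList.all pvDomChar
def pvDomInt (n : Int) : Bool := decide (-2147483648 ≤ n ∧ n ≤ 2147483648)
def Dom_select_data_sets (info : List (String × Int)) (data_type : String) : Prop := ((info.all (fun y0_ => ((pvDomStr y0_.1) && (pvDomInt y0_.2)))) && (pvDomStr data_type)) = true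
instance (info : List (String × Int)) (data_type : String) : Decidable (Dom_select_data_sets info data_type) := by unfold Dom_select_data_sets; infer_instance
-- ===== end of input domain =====

-- B replaces A's three map-to-''-then-filter(None) scans with one dispatch loop over the keys (simpler).

-- ===== PORT A =====
def select_data_sets (info : List (String × Int)) (data_type : String) : List String × List String × List String :=
  let end_str_ : String := if data_type == "specify" then ".csv" else ""
  let keys := (PySem.Dict.ofList info).keys
  let dev_sets := keys.map (fun set_name =>
    if PySem.Str.startswith set_name "DEV" && PySem.Str.endswith set_name end_str_ then set_name else "")
  let dev_sets := dev_sets.filter (fun s => !(s == ""))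
  let enr_sets := keys.map (fun set_name =>
    if PySem.Str.startswith set_name "ENR" && PySem.Str.endswith set_name end_str_ then set_name else "")
  let enr_sets := enr_sets.filter (fun s => !(s == ""))
  let test_sets := keys.map (fun set_name =>
    if PySem.Str.startswith set_name "TEST" && PySem.Str.endswith set_name end_str_ then set_name else "")
  let test_sets := test_sets.filter (fun s => !(s == ""))
  (dev_sets, enr_sets, test_sets)

-- ===== PORT B =====
-- the body of B's single for-loop: append the key to the list its prefix selects
def pvStep (end_str_ : String) (acc : List String × List String × List String) (set_name : String) :
    List String × List String × List String :=
  if PySem.Str.endswith set_name end_str_ then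
    if PySem.Str.startswith set_name "DEV" then (acc.1 ++ [set_name], acc.2.1, acc.2.2)
    else if PySem.Str.startswith set_name "ENR" then (acc.1, acc.2.1 ++ [set_name], acc.2.2)
    else if PySem.Str.startswith set_name "TEST" then (acc.1, acc.2.1, acc.2.2 ++ [set_name])
    else acc
  else acc

def select_data_sets_alt (info : List (String × Int)) (data_type : String) : List String × List String × List String :=
  let end_str_ : String := if data_type == "specify" then ".csv" else ""
  ((PySem.Dict.ofList info).keys).foldl (pvStep end_str_) ([], [], [])

-- ===== PRECONDITION & SPEC =====
def Spec_select_data_sets (info : List (String × Int)) (data_type : String) (out : List String × List String × List String) : Prop := out = select_data_sets_alt info data_type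
instance (info : List (String × Int)) (data_type : String) (out : List String × List String × List String) : Decidable (Spec_select_data_sets info data_type out) := by unfold Spec_select_data_sets; infer_instance

-- ===== CLAIM (what is proved, stated in full; the proofs are below) =====
def Claim_equal_select_data_sets : Prop := ∀ (info : List (String × Int)) (data_type : String), Dom_select_data_sets info data_type → Spec_select_data_sets info data_type (select_data_sets info data_type)

-- ===== LEMMAS AND PROOFS =====

-- two incomparable words cannot both be prefixes of the same string
lemma pv_not_both (s : List Char) (p q : List Char)
    (h : ¬ (p <+: q) ∧ ¬ (q <+: p)) (h1 : p <+: s) (h2 : q <+: s) : False := by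
  rcases List.prefix_or_prefix_of_prefix h1 h2 with hpq | hqp
  · exact h.1 hpq
  · exact h.2 hqp

lemma pv_DEV_not_ENR (x : String) (h : PySem.Str.startswith x "DEV" = true) :
    PySem.Str.startswith x "ENR" = false := by
  by_contra h2
  rw [Bool.not_eq_false, PySem.Str.startswith_eq, PySem.Chars.startswith_iff] at h2
  rw [PySem.Str.startswith_eq, PySem.Chars.startswith_iff] at h
  exact pv_not_both x.toList _ _ (by decide) h h2

lemma pv_DEV_not_TEST (x : String) (h : PySem.Str.startswith x "DEV" = true) :
    PySem.Str.startswith x "TEST" = false := by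
  by_contra h2
  rw [Bool.not_eq_false, PySem.Str.startswith_eq, PySem.Chars.startswith_iff] at h2
  rw [PySem.Str.startswith_eq, PySem.Chars.startswith_iff] at h
  exact pv_not_both x.toList _ _ (by decide) h h2

lemma pv_ENR_not_TEST (x : String) (h : PySem.Str.startswith x "ENR" = true) :
    PySem.Str.startswith x "TEST" = false := by
  by_contra h2
  rw [Bool.not_eq_false, PySem.Str.startswith_eq, PySem.Chars.startswith_iff] at h2
  rw [PySem.Str.startswith_eq, PySem.Chars.startswith_iff] at h
  exact pv_not_both x.toList _ _ (by decide) h h2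

lemma pv_map_filter (p : String → Bool) (hp : p "" = false) (l : List String) :
    (l.map (fun s => if p s then s else "")).filter (fun s => !(s == "")) = l.filter p := by
  induction l with
  | nil => rfl
  | cons x xs ih =>
    by_cases hx : p x = true
    · have hxne : ¬ (x == "") = true := by
        intro hx0
        have hxe : x = "" := by simpa using hx0
        rw [hxe] at hx; rw [hp] at hx; exact Bool.false_ne_true hx
      simp [List.map, List.filter, hx, hxne, ih]
    · simp [List.map, List.filter, hx, ih]

lemma pv_loop (end_str_ : String) (l : List String) (d e t : List String) :
    l.foldl (pvStep end_str_) (d, e, t)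
    = (d ++ l.filter (fun s => PySem.Str.startswith s "DEV" && PySem.Str.endswith s end_str_),
       e ++ l.filter (fun s => PySem.Str.startswith s "ENR" && PySem.Str.endswith s end_str_),
       t ++ l.filter (fun s => PySem.Str.startswith s "TEST" && PySem.Str.endswith s end_str_)) := by
  induction l generalizing d e t with
  | nil => simp
  | cons x xs ih =>
    rw [List.foldl_cons]
    by_cases he : PySem.Str.endswith x end_str_ = true
    · by_cases hd : PySem.Str.startswith x "DEV" = true
      · have h1 : (PySem.Str.startswith x "DEV" && PySem.Str.endswith x end_str_) = true := by
          rw [hd, he]; rfl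
        have h2 : (PySem.Str.startswith x "ENR" && PySem.Str.endswith x end_str_) = false := by
          rw [pv_DEV_not_ENR x hd]; rfl
        have h3 : (PySem.Str.startswith x "TEST" && PySem.Str.endswith x end_str_) = false := by
          rw [pv_DEV_not_TEST x hd]; rfl
        rw [show pvStep end_str_ (d, e, t) x = (d ++ [x], e, t) by
              unfold pvStep; rw [if_pos he, if_pos hd], ih]
        rw [List.filter_cons_of_pos (p := fun s => PySem.Str.startswith s "DEV" && PySem.Str.endswith s end_str_) h1, List.filter_cons_of_neg (p := fun s => PySem.Str.startswith s "ENR" && PySem.Str.endswith s end_str_) (Bool.eq_false_iff.mp h2), List.filter_cons_of_neg (p := fun s => PySem.Str.startswith s "TEST" && PySem.Str.endswith s end_str_) (Bool.eq_false_iff.mp h3),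
          List.append_assoc, List.singleton_append]
      · by_cases hen : PySem.Str.startswith x "ENR" = true
        · have h1 : (PySem.Str.startswith x "DEV" && PySem.Str.endswith x end_str_) = false := by
            rw [Bool.eq_false_iff.mpr hd]; rfl
          have h2 : (PySem.Str.startswith x "ENR" && PySem.Str.endswith x end_str_) = true := by
            rw [hen, he]; rfl
          have h3 : (PySem.Str.startswith x "TEST" && PySem.Str.endswith x end_str_) = false := by
            rw [pv_ENR_not_TEST x hen]; rfl
          rw [show pvStep end_str_ (d, e, t) x = (d, e ++ [x], t) by
                unfold pvStep; rw [if_pos he, if_neg hd, if_pos hen], ih]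
          rw [List.filter_cons_of_neg (p := fun s => PySem.Str.startswith s "DEV" && PySem.Str.endswith s end_str_) (Bool.eq_false_iff.mp h1), List.filter_cons_of_pos (p := fun s => PySem.Str.startswith s "ENR" && PySem.Str.endswith s end_str_) h2, List.filter_cons_of_neg (p := fun s => PySem.Str.startswith s "TEST" && PySem.Str.endswith s end_str_) (Bool.eq_false_iff.mp h3),
            List.append_assoc, List.singleton_append]
        · by_cases hts : PySem.Str.startswith x "TEST" = true
          · have h1 : (PySem.Str.startswith x "DEV" && PySem.Str.endswith x end_str_) = false := by
              rw [Bool.eq_false_iff.mpr hd]; rfl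
            have h2 : (PySem.Str.startswith x "ENR" && PySem.Str.endswith x end_str_) = false := by
              rw [Bool.eq_false_iff.mpr hen]; rfl
            have h3 : (PySem.Str.startswith x "TEST" && PySem.Str.endswith x end_str_) = true := by
              rw [hts, he]; rfl
            rw [show pvStep end_str_ (d, e, t) x = (d, e, t ++ [x]) by
                  unfold pvStep; rw [if_pos he, if_neg hd, if_neg hen, if_pos hts], ih]
            rw [List.filter_cons_of_neg (p := fun s => PySem.Str.startswith s "DEV" && PySem.Str.endswith s end_str_) (Bool.eq_false_iff.mp h1), List.filter_cons_of_neg (p := fun s => PySem.Str.startswith s "ENR" && PySem.Str.endswith s end_str_) (Bool.eq_false_iff.mp h2), List.filter_cons_of_pos (p := fun s => PySem.Str.startswith s "TEST" && PySem.Str.endswith s end_str_) h3,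
              List.append_assoc, List.singleton_append]
          · have h1 : (PySem.Str.startswith x "DEV" && PySem.Str.endswith x end_str_) = false := by
              rw [Bool.eq_false_iff.mpr hd]; rfl
            have h2 : (PySem.Str.startswith x "ENR" && PySem.Str.endswith x end_str_) = false := by
              rw [Bool.eq_false_iff.mpr hen]; rfl
            have h3 : (PySem.Str.startswith x "TEST" && PySem.Str.endswith x end_str_) = false := by
              rw [Bool.eq_false_iff.mpr hts]; rfl
            rw [show pvStep end_str_ (d, e, t) x = (d, e, t) by
                  unfold pvStep; rw [if_pos he, if_neg hd, if_neg hen, if_neg hts], ih]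
            rw [List.filter_cons_of_neg (p := fun s => PySem.Str.startswith s "DEV" && PySem.Str.endswith s end_str_) (Bool.eq_false_iff.mp h1), List.filter_cons_of_neg (p := fun s => PySem.Str.startswith s "ENR" && PySem.Str.endswith s end_str_) (Bool.eq_false_iff.mp h2), List.filter_cons_of_neg (p := fun s => PySem.Str.startswith s "TEST" && PySem.Str.endswith s end_str_) (Bool.eq_false_iff.mp h3)]
    · have hef : PySem.Str.endswith x end_str_ = false := Bool.eq_false_iff.mpr he
      have h1 : (PySem.Str.startswith x "DEV" && PySem.Str.endswith x end_str_) = false := by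
        rw [hef, Bool.and_false]
      have h2 : (PySem.Str.startswith x "ENR" && PySem.Str.endswith x end_str_) = false := by
        rw [hef, Bool.and_false]
      have h3 : (PySem.Str.startswith x "TEST" && PySem.Str.endswith x end_str_) = false := by
        rw [hef, Bool.and_false]
      rw [show pvStep end_str_ (d, e, t) x = (d, e, t) by unfold pvStep; rw [if_neg he], ih]
      rw [List.filter_cons_of_neg (p := fun s => PySem.Str.startswith s "DEV" && PySem.Str.endswith s end_str_) (Bool.eq_false_iff.mp h1), List.filter_cons_of_neg (p := fun s => PySem.Str.startswith s "ENR" && PySem.Str.endswith s end_str_) (Bool.eq_false_iff.mp h2), List.filter_cons_of_neg (p := fun s => PySem.Str.startswith s "TEST" && PySem.Str.endswith s end_str_) (Bool.eq_false_iff.mp h3)]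

-- ===== VERDICT (by name: the statement is the Claim_ definition above) =====
theorem select_data_sets_spec : Claim_equal_select_data_sets := by
  intro info data_type _
  unfold Spec_select_data_sets select_data_sets select_data_sets_alt
  dsimp only
  rw [pv_loop]
  have hD : PySem.Str.startswith "" "DEV" = false := by decide
  have hE : PySem.Str.startswith "" "ENR" = false := by decide
  have hT : PySem.Str.startswith "" "TEST" = false := by decide
  rw [pv_map_filter
        (fun s => PySem.Str.startswith s "DEV" &&
          PySem.Str.endswith s (if data_type == "specify" then ".csv" else "")) (by simp only [hD, Bool.false_and]),
      pv_map_filter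
        (fun s => PySem.Str.startswith s "ENR" &&
          PySem.Str.endswith s (if data_type == "specify" then ".csv" else "")) (by simp only [hE, Bool.false_and]),
      pv_map_filter
        (fun s => PySem.Str.startswith s "TEST" &&
          PySem.Str.endswith s (if data_type == "specify" then ".csv" else "")) (by simp only [hT, Bool.false_and])]
  simp [List.nil_append]
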